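-- pv_equiv track=rewrite | github.com/wjs2063/Python-Coding-test- | BOJ/1105(팔).py | solution
-- ===== SOURCE A (Python) =====
-- def solution(left,right):
--     if left==right:
--         return left.count("8")
--     # 8이 없는게 있다면 그냥 0
--     if left.count("8")<1 or right.count("8")<1:
--         return 0
--     # 길이가 다르면 무조건 0
--     if len(left)!=len(right):
--         return 0
--     # 길이가 같다면
--     # 순차비교
--     left=list(left)
--     right=list(right)
--     cnt=0
--
--     for i in range(len(left)):
--         # 예를들어 8788, 8888 을 보자
--         #  i번째가 달라졌다면 그뒤로는 볼필요가없게됨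
--         # i번째가 숫자가 다르다면 그뒤로는 무조건 8이없게 만들수있게된다
--         if left[i]!=right[i] :
--             break
--         # 둘다 8이라면 바뀔수없는것 그 자리는 바뀔수없다.
--         if left[i]==right[i] and left[i]=="8":
--             cnt+=1
--
--     return cnt
-- ===== SOURCE B (Python) =====
-- def solution(left, right):
--     if len(left) != len(right):
--         return 0
--     # binary search for the largest k with left[:k] == right[:k]
--     # (prefix equality is monotone in k)
--     lo, hi = 0, len(left)
--     while lo < hi:
--         mid = (lo + hi + 1) // 2
--         if left[:mid] == right[:mid]:
--             lo = mid
--         else: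
--             hi = mid - 1
--     return left[:lo].count("8")
-- ===== Notes on version B (the rewrite author's own statement) =====
-- stated objective: alternative
-- what changed: B binary-searches (via whole-prefix slice comparisons) for the largest k with left[:k]==right[:k], then counts '8' in that materialized prefix, instead of A's single interleaved character scan with an early break and counter.
import Mathlib
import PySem

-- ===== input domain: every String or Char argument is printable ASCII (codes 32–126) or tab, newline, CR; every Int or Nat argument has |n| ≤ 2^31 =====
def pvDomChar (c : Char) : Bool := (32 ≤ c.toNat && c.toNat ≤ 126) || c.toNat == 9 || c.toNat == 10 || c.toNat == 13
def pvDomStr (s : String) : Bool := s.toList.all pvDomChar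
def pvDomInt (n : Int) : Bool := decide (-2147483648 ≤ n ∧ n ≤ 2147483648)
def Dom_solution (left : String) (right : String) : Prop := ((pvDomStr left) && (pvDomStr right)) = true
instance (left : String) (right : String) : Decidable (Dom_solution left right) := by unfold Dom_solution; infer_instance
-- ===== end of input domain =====

-- B replaces A's interleaved scan-with-counter by a binary search for the largest k with
-- left[:k] == right[:k] (prefix equality is monotone), then counts '8' in that prefix.

-- ===== PORT A =====
-- the 'for i in range(len(left)): if left[i]!=right[i]: break; if …=='8': cnt+=1' loop
-- (run only when len(left)==len(right), so the index loop is recursion on the two lists in step)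
def solutionLoop : List Char → List Char → Int → Int
  | a :: as, b :: bs, cnt =>
      if a != b then cnt
      else if a == b && a == '8' then solutionLoop as bs (cnt + 1)
      else solutionLoop as bs cnt
  | _, _, cnt => cnt

def solution (left : String) (right : String) : Int :=
  if left == right then (PySem.Str.count left "8" : Int)
  else if PySem.Str.count left "8" < 1 ∨ PySem.Str.count right "8" < 1 then 0
  else if PySem.Str.len left ≠ PySem.Str.len right then 0
  else solutionLoop left.toList right.toList 0

-- ===== PORT B =====
-- the 'while lo < hi: mid=(lo+hi+1)//2; if left[:mid]==right[:mid]: lo=mid else: hi=mid-1' loop;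
-- lo,hi,mid stay ≥ 0 so Nat arithmetic matches Python's '//', and left[:m] with m ≥ 0 is List.take m
-- fuel = initial hi - lo bounds the iteration count (hi - lo strictly decreases); at fuel 0
-- the loop condition lo < hi is already false, so returning lo is the loop's own exit
def bsearchGo (l r : List Char) : Nat → Nat → Nat → Nat
  | Nat.succ fuel, lo, hi =>
      if lo < hi then
        let mid := (lo + hi + 1) / 2
        if l.take mid == r.take mid then bsearchGo l r fuel mid hi
        else bsearchGo l r fuel lo (mid - 1)
      else lo
  | 0, lo, _ => lo

def solution_alt (left : String) (right : String) : Int :=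
  if PySem.Str.len left ≠ PySem.Str.len right then 0
  else
    let lo := bsearchGo left.toList right.toList left.toList.length 0 left.toList.length
    (PySem.Chars.count (left.toList.take lo) ['8'] : Int)

-- ===== PRECONDITION & SPEC =====
def Spec_solution (left : String) (right : String) (out : Int) : Prop := out = solution_alt left right
instance (left : String) (right : String) (out : Int) : Decidable (Spec_solution left right out) := by unfold Spec_solution; infer_instance

-- ===== CLAIM (what is proved, stated in full; the proofs are below) =====
def Claim_equal_solution : Prop := ∀ (left : String) (right : String), Dom_solution left right → Spec_solution left right (solution left right)

-- ===== LEMMAS AND PROOFS =====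

-- index of the first mismatch (the quantity both programs compute around)
def firstDiff : List Char → List Char → Nat
  | a :: as, b :: bs => if a != b then 0 else firstDiff as bs + 1
  | _, _ => 0

-- single-character Python str.count is List.count
theorem count_go_single (c : Char) (l : List Char) (fuel acc : Nat) (h : l.length ≤ fuel) :
    PySem.Chars.count.go [c] fuel l acc = acc + l.count c := by
  induction l generalizing fuel acc with
  | nil => cases fuel <;> simp [PySem.Chars.count.go]
  | cons a t ih =>
      cases fuel with
      | zero => simp at h
      | succ n =>
        simp only [List.length_cons, Nat.succ_le_succ_iff] at h
        by_cases hac : c = a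
        · subst hac
          simp [PySem.Chars.count.go, List.isPrefixOf, ih _ _ h]
          omega
        · simp [PySem.Chars.count.go, List.isPrefixOf, beq_iff_eq, hac,
                ih _ _ h, Ne.symm hac]

theorem chars_count_single (l : List Char) (c : Char) :
    PySem.Chars.count l [c] = l.count c := by
  simpa using count_go_single c l l.length 0 le_rfl

theorem firstDiff_self (l : List Char) : firstDiff l l = l.length := by
  induction l with
  | nil => rfl
  | cons a t ih => simp [firstDiff, ih]

theorem firstDiff_le_length (l r : List Char) : firstDiff l r ≤ l.length := by
  induction l generalizing r with
  | nil => cases r <;> simp [firstDiff]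
  | cons a t ih =>
      cases r with
      | nil => simp [firstDiff]
      | cons b s =>
          by_cases hab : a = b
          · subst hab; simp [firstDiff, Nat.succ_le_succ (ih s)]
          · simp [firstDiff, bne_iff_ne, hab]

-- the common prefix is common
theorem take_firstDiff_eq (l r : List Char) :
    l.take (firstDiff l r) = r.take (firstDiff l r) := by
  induction l generalizing r with
  | nil => cases r <;> rfl
  | cons a t ih =>
      cases r with
      | nil => rfl
      | cons b s =>
          by_cases hab : a = b
          · subst hab; simp [firstDiff, ih]
          · simp [firstDiff, bne_iff_ne, hab]

-- prefix equality is exactly 'm ≤ firstDiff' (for m within the common length)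
theorem take_eq_iff (l r : List Char) (hlen : l.length = r.length) (m : Nat)
    (hm : m ≤ l.length) : l.take m = r.take m ↔ m ≤ firstDiff l r := by
  constructor
  · intro h
    induction l generalizing r m with
    | nil =>
        have hm0 : m = 0 := by simpa using hm
        subst hm0
        exact Nat.zero_le _
    | cons a t ih =>
        cases r with
        | nil => simp at hlen
        | cons b s =>
            cases m with
            | zero => omega
            | succ k =>
                simp only [List.take_succ_cons, List.cons.injEq] at h
                obtain ⟨hab, ht⟩ := h
                subst hab
                simp only [firstDiff, bne_self_eq_false, Bool.false_eq_true, if_false]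
                have := ih s (by simpa using hlen) k (by simpa using hm) ht
                omega
  · intro h
    have h1 := take_firstDiff_eq l r
    calc l.take m = (l.take (firstDiff l r)).take m := by
          rw [List.take_take, Nat.min_eq_left h]
      _ = (r.take (firstDiff l r)).take m := by rw [h1]
      _ = r.take m := by rw [List.take_take, Nat.min_eq_left h]

-- the binary search finds firstDiff
theorem bsearchGo_eq (l r : List Char) (hlen : l.length = r.length) :
    ∀ n lo hi, hi - lo ≤ n → lo ≤ firstDiff l r → firstDiff l r ≤ hi → hi ≤ l.length →
      bsearchGo l r n lo hi = firstDiff l r := by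
  intro n
  induction n with
  | zero =>
      intro lo hi h1 h2 h3 _
      simp only [bsearchGo]
      omega
  | succ k ih =>
      intro lo hi h1 h2 h3 h4
      simp only [bsearchGo]
      by_cases hlt : lo < hi
      · rw [if_pos hlt]
        set mid := (lo + hi + 1) / 2 with hmid
        have hb1 : lo < mid := by omega
        have hb2 : mid ≤ hi := by omega
        by_cases heq : l.take mid = r.take mid
        · rw [if_pos (by exact beq_iff_eq.mpr heq)]
          have hle : mid ≤ firstDiff l r := (take_eq_iff l r hlen mid (by omega)).mp heq
          exact ih mid hi (by omega) hle h3 h4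
        · rw [if_neg (by simpa using heq)]
          have hgt : ¬ mid ≤ firstDiff l r := fun hc =>
            heq ((take_eq_iff l r hlen mid (by omega)).mpr hc)
          exact ih lo (mid - 1) (by omega) h2 (by omega) (by omega)
      · rw [if_neg hlt]
        omega

theorem solution_alt_eq_take (left right : String)
    (hlen : left.toList.length = right.toList.length) :
    solution_alt left right =
      ((left.toList.take (firstDiff left.toList right.toList)).count '8' : Int) := by
  unfold solution_alt
  rw [if_neg (by simp [PySem.Str.len_eq, hlen])]
  have hb := bsearchGo_eq left.toList right.toList hlen left.toList.length 0
      left.toList.length (by omega) (Nat.zero_le _)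
      (firstDiff_le_length _ _) le_rfl
  simp only [hb, chars_count_single]

-- A's scan equals '8'-count of the common prefix
theorem solutionLoop_eq (l r : List Char) (cnt : Int) :
    solutionLoop l r cnt = cnt + ((l.take (firstDiff l r)).count '8' : Int) := by
  induction l generalizing r cnt with
  | nil => cases r <;> simp [solutionLoop, firstDiff]
  | cons a t ih =>
      cases r with
      | nil => simp [solutionLoop, firstDiff]
      | cons b s =>
          by_cases hab : a = b
          · subst hab
            by_cases h8 : a = '8'
            · subst h8
              simp [solutionLoop, firstDiff, ih]
              ring
            · simp [solutionLoop, firstDiff, ih, h8]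
          · simp [solutionLoop, firstDiff, bne_iff_ne, hab]

-- ===== VERDICT (by name: the statement is the Claim_ definition above) =====
theorem solution_spec : Claim_equal_solution := by
  intro left right _
  unfold Spec_solution
  unfold solution
  split_ifs with heq h8 hlen
  · -- left == right
    have he : left = right := by exact eq_of_beq heq
    subst he
    rw [solution_alt_eq_take left left rfl, firstDiff_self, List.take_length]
    simp [PySem.Str.count_eq, chars_count_single]
  · -- one side has no '8': B's prefix count is 0 too
    by_cases hl : left.toList.length = right.toList.length
    · rw [solution_alt_eq_take left right hl]
      rcases h8 with h | h
      · have h0 : left.toList.count '8' = 0 := by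
          simpa [PySem.Str.count_eq, chars_count_single] using Nat.lt_one_iff.mp h
        have := List.Sublist.count_le (l₁ := left.toList.take (firstDiff left.toList right.toList))
          '8' (List.take_sublist _ _)
        omega
      · have h0 : right.toList.count '8' = 0 := by
          simpa [PySem.Str.count_eq, chars_count_single] using Nat.lt_one_iff.mp h
        rw [take_firstDiff_eq]
        have := List.Sublist.count_le (l₁ := right.toList.take (firstDiff left.toList right.toList))
          '8' (List.take_sublist _ _)
        omega
    · unfold solution_alt
      rw [if_pos (by simp only [PySem.Str.len_eq, ne_eq, Nat.cast_inj]; exact hl)]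
  · -- length mismatch: both 0
    unfold solution_alt
    rw [if_pos]
    simpa [PySem.Str.len_eq] using hlen
  · -- the scan
    have hl : left.toList.length = right.toList.length := by
      simpa [PySem.Str.len_eq] using hlen
    rw [solution_alt_eq_take left right hl, solutionLoop_eq]
    simp
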